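-- pv_equiv track=rewrite | github.com/Yaman-Abu-Jazar/-Optimizing-Job-Shop-Scheduling-in-a-Manufacturing-Plant-using-Genetic-Algorithm | main.py | is_valid_individual
-- ===== SOURCE A (Python) =====
-- def is_valid_individual(individual, jobs):
--     job_operation_map = {job_id: [] for job_id in range(len(jobs))}
--     for job_id, op_index in individual:
--         job_operation_map[job_id].append(op_index)
--     for job_id, operations in job_operation_map.items():
--         if operations != sorted(operations):
--             return False
--     return True
-- ===== SOURCE B (Python) =====
-- def is_valid_individual(individual, jobs):
--     last = {job_id: None for job_id in range(len(jobs))}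
--     for job_id, op_index in individual:
--         prev = last[job_id]
--         if prev is not None and op_index < prev:
--             return False
--         last[job_id] = op_index
--     return True
-- ===== Notes on version B (the rewrite author's own statement) =====
-- stated objective: simpler
-- what changed: Instead of grouping every operation into per-job lists and sorting each list to compare, B makes a single pass keeping only the previously seen op_index per job and fails as soon as one decreases; Pre_ excludes individuals containing a job_id outside range(len(jobs)), on which both A and B raise KeyError.
import Mathlib
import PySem

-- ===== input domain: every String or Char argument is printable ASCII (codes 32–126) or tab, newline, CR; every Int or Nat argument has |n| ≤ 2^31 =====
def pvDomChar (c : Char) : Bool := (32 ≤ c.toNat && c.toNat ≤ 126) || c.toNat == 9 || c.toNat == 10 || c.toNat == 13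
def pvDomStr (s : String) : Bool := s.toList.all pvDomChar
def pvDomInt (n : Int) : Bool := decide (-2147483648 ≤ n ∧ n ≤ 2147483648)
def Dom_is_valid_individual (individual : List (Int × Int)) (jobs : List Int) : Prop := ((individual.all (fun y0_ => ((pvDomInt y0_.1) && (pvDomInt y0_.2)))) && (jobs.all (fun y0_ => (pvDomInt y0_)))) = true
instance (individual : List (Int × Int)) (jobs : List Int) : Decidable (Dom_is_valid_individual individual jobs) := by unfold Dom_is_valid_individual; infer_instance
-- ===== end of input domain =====

-- B replaces A's group-into-lists-then-sort-each check by a single pass keeping only the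
-- previously seen op_index per job (objective: simpler).

-- ===== PORT A =====
def is_valid_individual (individual : List (Int × Int)) (jobs : List Int) : Bool :=
  let m0 : PySem.Dict Int (List Int) :=
    (PySem.List.pyRange 0 (jobs.length : Int) 1).foldl (fun d j => d.insert j []) PySem.Dict.empty
  let m := individual.foldl (fun d p => d.modify p.1 [] (fun x => x ++ [p.2])) m0
  m.items.all (fun p => p.2 == PySem.List.sorted p.2 (fun x => x))

-- ===== PORT B =====
-- the for-loop of Source B with its early return False
def pvScanLast (last : PySem.Dict Int (Option Int)) : List (Int × Int) → Bool
  | [] => true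
  | (j, i) :: rest =>
    match last.getD j none with
    | some prev => if i < prev then false else pvScanLast (last.insert j (some i)) rest
    | none => pvScanLast (last.insert j (some i)) rest

def is_valid_individual_alt (individual : List (Int × Int)) (jobs : List Int) : Bool :=
  pvScanLast
    ((PySem.List.pyRange 0 (jobs.length : Int) 1).foldl
      (fun d j => d.insert j (none : Option Int)) PySem.Dict.empty)
    individual

-- ===== PRECONDITION & SPEC =====
-- Pre_ excludes exactly the inputs on which the Python A raises KeyError: an individual
-- mentioning a job_id outside range(len(jobs)). (B's Python raises KeyError there too,
-- unless an earlier violation makes it return False first.)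
def Pre_is_valid_individual (individual : List (Int × Int)) (jobs : List Int) : Prop :=
  ∀ p ∈ individual, 0 ≤ p.1 ∧ p.1 < (jobs.length : Int)
instance (individual : List (Int × Int)) (jobs : List Int) : Decidable (Pre_is_valid_individual individual jobs) := by unfold Pre_is_valid_individual; infer_instance

def pvWitness_is_valid_individual : (List (Int × Int)) × List Int :=
  ([(0, 0), (1, 2), (0, 1), (1, 2)], [5, 7])

def Spec_is_valid_individual (individual : List (Int × Int)) (jobs : List Int) (out : Bool) : Prop := out = is_valid_individual_alt individual jobs
instance (individual : List (Int × Int)) (jobs : List Int) (out : Bool) : Decidable (Spec_is_valid_individual individual jobs out) := by unfold Spec_is_valid_individual; infer_instance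

-- ===== CLAIM (what is proved, stated in full; the proofs are below) =====
def Claim_equal_is_valid_individual : Prop := ∀ (individual : List (Int × Int)) (jobs : List Int), Dom_is_valid_individual individual jobs → Pre_is_valid_individual individual jobs → Spec_is_valid_individual individual jobs (is_valid_individual individual jobs)

-- ===== LEMMAS AND PROOFS =====

-- the per-job subsequence of operation indices, in order of appearance
def pvOps (c : Int) (l : List (Int × Int)) : List Int :=
  List.map (fun x => x.2) (List.filter (fun p => p.1 == c) l)

-- "the indices seen so far for this job, continued by xs, are non-decreasing"
def pvChainFrom : Option Int → List Int → Prop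
  | none, xs => List.IsChain (· ≤ ·) xs
  | some v, xs => List.IsChain (· ≤ ·) (v :: xs)

lemma pvChainFrom_nil (o : Option Int) : pvChainFrom o [] := by
  cases o with
  | none => exact List.isChain_nil
  | some v => exact List.isChain_singleton v

lemma pvOps_cons (c j i : Int) (rest : List (Int × Int)) :
    pvOps c ((j, i) :: rest) = if j = c then i :: pvOps c rest else pvOps c rest := by
  simp only [pvOps, List.filter_cons]
  by_cases h : j = c <;> simp [h]

lemma pvGetD_foldl_insert_const {ν : Type} (c : ν) :
    ∀ (xs : List Int) (d : PySem.Dict Int ν), (∀ k, d.getD k c = c) →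
      ∀ k, (xs.foldl (fun d j => d.insert j c) d).getD k c = c := by
  intro xs
  induction xs with
  | nil => intro d h k; exact h k
  | cons x xs ih =>
    intro d h k
    refine ih _ (fun k' => ?_) k
    rw [PySem.Dict.getD_insert]
    split_ifs with hk
    · rfl
    · exact h k'

lemma pvScanLast_iff :
    ∀ (l : List (Int × Int)) (d : PySem.Dict Int (Option Int)),
      pvScanLast d l = true ↔ ∀ j : Int, pvChainFrom (d.getD j none) (pvOps j l) := by
  intro l
  induction l with
  | nil =>
    intro d
    simp [pvScanLast, pvOps, pvChainFrom_nil]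
  | cons p rest ih =>
    obtain ⟨j, i⟩ := p
    intro d
    rw [pvScanLast]
    cases hp : d.getD j none with
    | none =>
      rw [ih]
      refine forall_congr' (fun c => ?_)
      rw [pvOps_cons, PySem.Dict.getD_insert]
      by_cases hc : c = j
      · subst hc
        simp only [reduceIte, hp]
        simp [pvChainFrom]
      · have hc' : ¬ j = c := fun h => hc h.symm
        rw [if_neg hc, if_neg hc']
    | some prev =>
      by_cases hlt : i < prev
      · simp only [if_pos hlt]
        constructor
        · intro h; exact absurd h (by simp)
        · intro h
          exfalso
          have hj := h j
          rw [hp, pvOps_cons, if_pos rfl] at hj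
          have : prev ≤ i := (List.isChain_cons_cons.mp hj).1
          omega
      · simp only [if_neg hlt]
        rw [ih]
        refine forall_congr' (fun c => ?_)
        rw [pvOps_cons, PySem.Dict.getD_insert]
        by_cases hc : c = j
        · subst hc
          simp only [reduceIte, hp]
          simp only [pvChainFrom, List.isChain_cons_cons]
          constructor
          · intro h; exact ⟨by omega, h⟩
          · intro h; exact h.2
        · have hc' : ¬ j = c := fun h => hc h.symm
          rw [if_neg hc, if_neg hc']

lemma pvItems_all_sorted_iff (m : PySem.Dict Int (List Int)) (g : Int → List Int)
    (hn : m.keys.Nodup) (h : ∀ j, m.getD j [] = g j) :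
    (m.items.all (fun p => p.2 == PySem.List.sorted p.2 (fun x => x)) = true) ↔
      ∀ j : Int, List.Pairwise (· ≤ ·) (g j) := by
  rw [List.all_eq_true]
  constructor
  · intro H j
    cases hg : g j with
    | nil => exact List.Pairwise.nil
    | cons x xs =>
      have hget : m.get? j = some (g j) := by
        have hj := h j
        rw [PySem.Dict.getD_eq_get?_getD] at hj
        cases hq : m.get? j with
        | none =>
          rw [hq] at hj
          simp only [Option.getD_none] at hj
          rw [hg] at hj
          exact absurd hj (by simp)
        | some v =>
          rw [hq] at hj
          simp only [Option.getD_some] at hj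
          rw [hj]
      have hmem := PySem.Dict.mem_items_of_get?_eq_some m hget
      have hs := H _ hmem
      simp only [beq_iff_eq] at hs
      rw [← hg, hs]
      exact PySem.List.sorted_pairwise _ _
  · intro H p hp
    obtain ⟨k, v⟩ := p
    have h2 : m.getD k [] = v := PySem.Dict.getD_of_mem_items m hp hn []
    rw [h k] at h2
    simp only [beq_iff_eq]
    rw [← h2, PySem.List.sorted_eq_self_of_pairwise _ _ (H k)]

lemma pvA_iff (individual : List (Int × Int)) (jobs : List Int) :
    is_valid_individual individual jobs = true ↔
      ∀ j : Int, List.Pairwise (· ≤ ·) (pvOps j individual) := by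
  have hm0 : ∀ k : Int,
      ((PySem.List.pyRange 0 (jobs.length : Int) 1).foldl
        (fun d j => d.insert j ([] : List Int)) PySem.Dict.empty).getD k [] = [] :=
    pvGetD_foldl_insert_const [] _ _ (fun k => by simp [pysem])
  have hn0 : ((PySem.List.pyRange 0 (jobs.length : Int) 1).foldl
        (fun d j => d.insert j ([] : List Int)) PySem.Dict.empty).keys.Nodup :=
    PySem.Dict.nodup_keys_foldl_insert _ (fun _ _ => []) _ PySem.Dict.nodup_keys_empty
  show ((individual.foldl
      (fun (d : PySem.Dict Int (List Int)) (p : Int × Int) => d.modify p.1 [] (fun x => x ++ [p.2]))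
      ((PySem.List.pyRange 0 (jobs.length : Int) 1).foldl
        (fun d j => d.insert j ([] : List Int)) PySem.Dict.empty)).items.all
      (fun p => p.2 == PySem.List.sorted p.2 (fun x => x)) = true) ↔ _
  refine pvItems_all_sorted_iff _ _ ?_ ?_
  · exact PySem.Dict.nodup_keys_foldl_modify_key individual (fun p => p.1) []
      (fun _ p => fun x => x ++ [p.2]) _ hn0
  · intro j
    rw [PySem.Dict.getD_foldl_modify_append, hm0]
    rfl

lemma pvB_iff (individual : List (Int × Int)) (jobs : List Int) :
    is_valid_individual_alt individual jobs = true ↔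
      ∀ j : Int, List.IsChain (· ≤ ·) (pvOps j individual) := by
  have hm0 : ∀ k : Int,
      ((PySem.List.pyRange 0 (jobs.length : Int) 1).foldl
        (fun d j => d.insert j (none : Option Int)) PySem.Dict.empty).getD k none = none :=
    pvGetD_foldl_insert_const none _ _ (fun k => by simp [pysem])
  show pvScanLast _ individual = true ↔ _
  rw [pvScanLast_iff]
  exact forall_congr' (fun j => by rw [hm0 j]; rfl)

-- ===== VERDICT (by name: the statement is the Claim_ definition above) =====
theorem is_valid_individual_spec : Claim_equal_is_valid_individual := by
  intro individual jobs _ _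
  unfold Spec_is_valid_individual
  rw [Bool.eq_iff_iff, pvA_iff, pvB_iff]
  exact forall_congr' (fun j => (List.isChain_iff_pairwise).symm)
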